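-- pv_equiv track=rewrite | github.com/krotalias/cwdc | downloads/python/labs/_11_ncsub_rec.py | ncsub
-- ===== SOURCE A (Python) =====
-- def ncsub(seq, s=0):
--     if seq:
--         x = seq[:1]   # only the first element
--         xs = seq[1:]  # remove the first element
--         p2 = s % 2
--         p1 = not p2
--         return [x + ys for ys in ncsub(xs, s + p1)] + ncsub(xs, s + p2)
--     else:             # empty list
--         return [[]] if s >= 3 else []
-- ===== SOURCE B (Python) =====
-- def ncsub(seq, s=0):
--     # Bottom-up DP over suffixes: one row per suffix, entry j = result for
--     # accumulated value s+j; each distinct (suffix, s) state is built once.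
--     n = len(seq)
--     row = [[[]] if s + j >= 3 else [] for j in range(n + 1)]
--     for x in reversed(seq):
--         new = []
--         p = s % 2
--         for a, b in zip(row, row[1:]):
--             if p == 0:
--                 new.append([[x] + ys for ys in b] + a)
--             else:
--                 new.append([[x] + ys for ys in a] + b)
--             p = 1 - p
--         row = new
--     return row[0]
-- ===== Notes on version B (the rewrite author's own statement) =====
-- stated objective: alternative
-- what changed: Replaced A's top-down branching recursion (2^n call instances over n^2 distinct (suffix, s) states) by a bottom-up dynamic program: one row of results per suffix, each state computed exactly once by a pairwise sweep over the previous row.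
import Mathlib
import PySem

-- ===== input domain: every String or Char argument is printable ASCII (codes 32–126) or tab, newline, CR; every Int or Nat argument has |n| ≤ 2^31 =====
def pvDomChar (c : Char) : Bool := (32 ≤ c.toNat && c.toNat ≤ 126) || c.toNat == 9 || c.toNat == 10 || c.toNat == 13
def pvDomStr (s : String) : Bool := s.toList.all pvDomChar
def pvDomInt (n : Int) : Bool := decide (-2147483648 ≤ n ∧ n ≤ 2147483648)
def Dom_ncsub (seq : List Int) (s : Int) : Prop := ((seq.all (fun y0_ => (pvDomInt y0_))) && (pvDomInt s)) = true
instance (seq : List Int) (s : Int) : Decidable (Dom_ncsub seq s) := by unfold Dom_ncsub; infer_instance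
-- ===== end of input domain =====

-- B replaces A's exponential top-down recursion by a bottom-up DP over suffixes
-- (one row of results per suffix, swept pairwise); objective: alternative algorithm.

-- ===== PORT A =====
-- literal transliteration of A's recursion: x = seq[:1], xs = seq[1:],
-- p2 = s % 2 (Python floor mod, PySem.Int.mod), p1 = not p2 (used as int 1/0)
def ncsub (seq : List Int) (s : Int) : List (List Int) :=
  match seq with
  | [] => if 3 ≤ s then [[]] else []
  | x :: xs =>
    let p2 := PySem.Int.mod s 2
    let p1 : Int := if p2 == 0 then 1 else 0
    ((ncsub xs (s + p1)).map (fun ys => x :: ys)) ++ ncsub xs (s + p2)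

-- ===== PORT B =====
-- inner loop of Source B: walk row and row[1:] pairwise, flipping the parity flag p
def ncsubStep (x : Int) (p : Int) : List (List (List Int)) → List (List (List Int))
  | a :: b :: rest =>
    (if p == 0 then (b.map (fun ys => x :: ys)) ++ a
     else (a.map (fun ys => x :: ys)) ++ b) :: ncsubStep x (1 - p) (b :: rest)
  | _ => []

-- Source B: initial row for the empty suffix, then fold over reversed(seq);
-- row[0] rendered as headD [] (the row is never empty, so this is exact)
def ncsub_alt (seq : List Int) (s : Int) : List (List Int) :=
  (seq.reverse.foldl (fun row x => ncsubStep x (PySem.Int.mod s 2) row)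
    ((List.range (seq.length + 1)).map
      (fun (j : Nat) => if 3 ≤ s + (j : Int) then [([] : List Int)] else []))).headD []

-- ===== PRECONDITION & SPEC =====
def Spec_ncsub (seq : List Int) (s : Int) (out : List (List Int)) : Prop := out = ncsub_alt seq s
instance (seq : List Int) (s : Int) (out : List (List Int)) : Decidable (Spec_ncsub seq s out) := by unfold Spec_ncsub; infer_instance

-- ===== CLAIM (what is proved, stated in full; the proofs are below) =====
def Claim_equal_ncsub : Prop := ∀ (seq : List Int) (s : Int), Dom_ncsub seq s → Spec_ncsub seq s (ncsub seq s)

-- ===== LEMMAS AND PROOFS =====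

-- the row of A-results for a fixed suffix l: entry j is ncsub l (t + j)
def ncsubRow (l : List Int) (t : Int) (m : Nat) : List (List (List Int)) :=
  (List.range m).map (fun (j : Nat) => ncsub l (t + (j : Int)))

theorem ncsubRow_succ (l : List Int) (t : Int) (m : Nat) :
    ncsubRow l t (m + 1) = ncsub l t :: ncsubRow l (t + 1) m := by
  unfold ncsubRow
  rw [List.range_succ_eq_map, List.map_cons, List.map_map]
  congr 1
  · norm_num
  · apply List.map_congr_left
    intro j _
    simp only [Function.comp, Nat.succ_eq_add_one]
    congr 1
    push_cast
    ring

theorem ncsubStep_spec (m : Nat) : ∀ (l : List Int) (x t : Int),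
    ncsubStep x (PySem.Int.mod t 2) (ncsubRow l t (m + 1)) = ncsubRow (x :: l) t m := by
  induction m with
  | zero =>
    intro l x t
    simp [ncsubRow, ncsubStep]
  | succ m ih =>
    intro l x t
    rw [ncsubRow_succ, ncsubRow_succ l (t + 1) m]
    have hmod : PySem.Int.mod t 2 = t % 2 := PySem.Int.mod_eq_emod_of_pos (by norm_num)
    have h2 : t % 2 = 0 ∨ t % 2 = 1 := Int.emod_two_eq_zero_or_one t
    have hflip : (1 : Int) - t % 2 = (t + 1) % 2 := by omega
    have hrec : ncsubStep x (1 - PySem.Int.mod t 2)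
        (ncsub l (t + 1) :: ncsubRow (l := l) (t + 1 + 1) m) = ncsubRow (x :: l) (t + 1) m := by
      have := ih l x (t + 1)
      rw [ncsubRow_succ] at this
      rw [hmod, hflip, ← PySem.Int.mod_eq_emod_of_pos (a := t + 1) (by norm_num)]
      exact this
    rw [ncsubRow_succ (x :: l) t m, ← hrec]
    rcases h2 with h | h
    · -- parity 0: taken branch reads entry j+1, skip branch entry j
      simp only [ncsubStep, hmod, h]
      congr 1
      show _ = ncsub (x :: l) t
      simp only [ncsub, hmod, h]
      norm_num
    · -- parity 1
      simp only [ncsubStep, hmod, h]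
      congr 1
      show _ = ncsub (x :: l) t
      simp only [ncsub, hmod, h]
      norm_num

theorem ncsub_fold_spec (u : List Int) : ∀ (t : Int) (m : Nat),
    u.foldr (fun x row => ncsubStep x (PySem.Int.mod t 2) row) (ncsubRow [] t (u.length + m + 1))
      = ncsubRow u t (m + 1) := by
  induction u with
  | nil => intro t m; simp
  | cons x v ih =>
    intro t m
    simp only [List.foldr_cons]
    have hlen : (x :: v).length + m + 1 = v.length + (m + 1) + 1 := by simp; omega
    rw [hlen, ih t (m + 1)]
    exact ncsubStep_spec (m + 1) v x t

theorem row0_eq (seq : List Int) (s : Int) :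
    (List.range (seq.length + 1)).map
      (fun (j : Nat) => if 3 ≤ s + (j : Int) then [([] : List Int)] else [])
      = ncsubRow [] s (seq.length + 1) := by
  apply List.map_congr_left
  intro j _
  simp [ncsub]

theorem ncsub_alt_eq (seq : List Int) (s : Int) : ncsub_alt seq s = ncsub seq s := by
  unfold ncsub_alt
  rw [row0_eq, List.foldl_reverse]
  have h : seq.length + 1 = seq.length + 0 + 1 := by omega
  rw [h, ncsub_fold_spec seq s 0]
  simp [ncsubRow]

-- ===== VERDICT (by name: the statement is the Claim_ definition above) =====
theorem ncsub_spec : Claim_equal_ncsub := by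
  intro seq s _
  unfold Spec_ncsub
  exact (ncsub_alt_eq seq s).symm
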